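-- pv_equiv track=rewrite | github.com/al-ramsey/aoc_2024 | 13.py | backsubs
-- ===== SOURCE A (Python) =====
-- def backsubs(rs, ms):
--     if len(rs) == 1:
--         alpha = 1
--         beta = -1*ms[0]
--         return (alpha, beta)
--     elif len(rs) == 2:
--         alpha = -1*ms[-1]
--         beta = 1 + ms[0]*ms[1]
--         return (alpha, beta)
--     else:
--         albe1 = backsubs(rs[:-2], ms[:-2])
--         albe2 = backsubs(rs[:-1], ms[:-1])
--         alpha = albe1[0] - albe2[0]*ms[-1]
--         beta = albe1[1] - albe2[1]*ms[-1]
--         return (alpha, beta)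
-- ===== SOURCE B (Python) =====
-- def backsubs(rs, ms):
--     n = len(rs)
--     if n == 1:
--         return (1, -ms[0])
--     d = len(ms) - n
--     a1, b1 = 1, -ms[0]
--     a2, b2 = -ms[d + 1], 1 + ms[0] * ms[1]
--     for k in range(3, n + 1):
--         c = ms[k + d - 1]
--         a1, a2 = a2, a1 - a2 * c
--         b1, b2 = b2, b1 - b2 * c
--     return (a2, b2)
-- ===== Notes on version B (the rewrite author's own statement) =====
-- stated objective: faster
-- what changed: Replaced the doubly-exponential two-branch recursion (recomputing each prefix's (alpha,beta) O(2^n) times) by a single bottom-up loop carrying the last two prefix results; intended as faster (measured 9.79x at n=16; A times out at n=64 where B returns).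
import Mathlib
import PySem

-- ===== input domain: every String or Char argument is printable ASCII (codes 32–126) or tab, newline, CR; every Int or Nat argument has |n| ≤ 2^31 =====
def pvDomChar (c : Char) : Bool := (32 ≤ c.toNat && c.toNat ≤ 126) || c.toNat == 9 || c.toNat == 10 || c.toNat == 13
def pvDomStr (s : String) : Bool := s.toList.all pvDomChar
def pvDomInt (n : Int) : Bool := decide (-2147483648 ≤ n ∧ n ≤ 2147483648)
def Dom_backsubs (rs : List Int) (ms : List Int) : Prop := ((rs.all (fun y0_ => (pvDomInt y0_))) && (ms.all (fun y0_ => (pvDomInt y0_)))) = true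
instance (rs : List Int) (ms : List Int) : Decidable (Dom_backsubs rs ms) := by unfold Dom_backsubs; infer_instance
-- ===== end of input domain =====

-- B replaces A's doubly-exponential two-branch recursion by a single bottom-up loop carrying the
-- (alpha,beta) pairs of the last two prefixes; intended as faster (timing: 9.79x at n=16,
-- A timed out at n=64 where B returned).


-- ===== PORT A =====
-- literal transliteration of A's recursion; the Nat fuel (= rs.length at top level) only
-- makes the recursion total in Lean — it is never exhausted on inputs satisfying Pre_.
def backsubsF : Nat → List Int → List Int → Int × Int
  | 0, _, _ => (0, 0)
  | f + 1, rs, ms =>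
    if rs.length = 1 then
      (1, -1 * PySem.List.pyGetD ms 0 0)
    else if rs.length = 2 then
      (-1 * PySem.List.pyGetD ms (-1) 0,
       1 + PySem.List.pyGetD ms 0 0 * PySem.List.pyGetD ms 1 0)
    else
      let albe1 := backsubsF f (PySem.List.slice rs none (some (-2))) (PySem.List.slice ms none (some (-2)))
      let albe2 := backsubsF f (PySem.List.slice rs none (some (-1))) (PySem.List.slice ms none (some (-1)))
      (albe1.1 - albe2.1 * PySem.List.pyGetD ms (-1) 0,
       albe1.2 - albe2.2 * PySem.List.pyGetD ms (-1) 0)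

def backsubs (rs : List Int) (ms : List Int) : Int × Int :=
  backsubsF rs.length rs ms

-- ===== PORT B =====
def backsubs_alt (rs : List Int) (ms : List Int) : Int × Int :=
  let n : Int := rs.length
  if n = 1 then
    (1, -PySem.List.pyGetD ms 0 0)
  else
    let d : Int := (ms.length : Int) - n
    let init : Int × Int × Int × Int :=
      (1, -PySem.List.pyGetD ms 0 0,
       -PySem.List.pyGetD ms (d + 1) 0,
       1 + PySem.List.pyGetD ms 0 0 * PySem.List.pyGetD ms 1 0)
    let st := (PySem.List.pyRange 3 (n + 1) 1).foldl
      (fun (s : Int × Int × Int × Int) k =>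
        let c := PySem.List.pyGetD ms (k + d - 1) 0
        (s.2.2.1, s.2.2.2, s.1 - s.2.2.1 * c, s.2.1 - s.2.2.2 * c)) init
    (st.2.2.1, st.2.2.2)

-- ===== PRECONDITION & SPEC =====
-- A raises (RecursionError on rs = [], IndexError when ms is shorter than rs) exactly outside Pre_.
def Pre_backsubs (rs : List Int) (ms : List Int) : Prop :=
  rs ≠ [] ∧ rs.length ≤ ms.length
instance (rs : List Int) (ms : List Int) : Decidable (Pre_backsubs rs ms) := by
  unfold Pre_backsubs; infer_instance

def pvWitness_backsubs : List Int × List Int := ([3, 1, 4], [2, 7, 1])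

def Spec_backsubs (rs : List Int) (ms : List Int) (out : Int × Int) : Prop := out = backsubs_alt rs ms
instance (rs : List Int) (ms : List Int) (out : Int × Int) : Decidable (Spec_backsubs rs ms out) := by unfold Spec_backsubs; infer_instance

-- ===== CLAIM (what is proved, stated in full; the proofs are below) =====
def Claim_equal_backsubs : Prop := ∀ (rs : List Int) (ms : List Int), Dom_backsubs rs ms → Pre_backsubs rs ms → Spec_backsubs rs ms (backsubs rs ms)

-- ===== LEMMAS AND PROOFS =====

-- The mathematical recurrence both programs compute: (alpha, beta) for the length-k prefix
-- of rs, where d = ms.length - rs.length (ms prefixes keep the same overhang d).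
def bsRec (ms : List Int) (d : Nat) : Nat → Int × Int
  | 0 => (0, 0)
  | 1 => (1, -ms.getD 0 0)
  | 2 => (-ms.getD (d + 1) 0, 1 + ms.getD 0 0 * ms.getD 1 0)
  | (k + 3) =>
    let p := bsRec ms d (k + 1)
    let q := bsRec ms d (k + 2)
    let c := ms.getD (k + 2 + d) 0
    (p.1 - q.1 * c, p.2 - q.2 * c)

theorem bsRec_take (ms : List Int) (d : Nat) (t : Nat) :
    ∀ k, k + d ≤ t → bsRec (ms.take t) d k = bsRec ms d k := by
  intro k
  induction k using Nat.strong_induction_on with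
  | _ k ih =>
    intro hk
    match k with
    | 0 => rfl
    | 1 =>
      simp [bsRec, List.getD, List.getElem?_take_of_lt (by omega : 0 < t)]
    | 2 =>
      simp [bsRec, List.getD, List.getElem?_take_of_lt (by omega : 0 < t),
            List.getElem?_take_of_lt (by omega : 1 < t),
            List.getElem?_take_of_lt (by omega : d + 1 < t)]
    | (k + 3) =>
      simp only [bsRec]
      rw [ih (k + 1) (by omega) (by omega), ih (k + 2) (by omega) (by omega)]
      simp [List.getD, List.getElem?_take_of_lt (by omega : k + 2 + d < t)]

theorem backsubsF_eq_bsRec (f : Nat) :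
    ∀ rs ms : List Int, 1 ≤ rs.length → rs.length ≤ ms.length → rs.length ≤ f →
      backsubsF f rs ms = bsRec ms (ms.length - rs.length) rs.length := by
  induction f with
  | zero => intro rs ms h1 _ h3; omega
  | succ f ih =>
    intro rs ms h1 h2 h3
    by_cases e1 : rs.length = 1
    · simp [backsubsF, e1, bsRec, PySem.List.pyGetD_ofNat']
    · by_cases e2 : rs.length = 2
      · have hm : 2 ≤ ms.length := by omega
        have hne : ms ≠ [] := by intro h; simp [h] at hm
        have hlast : PySem.List.pyGetD ms (-1) 0 = ms.getD (ms.length - rs.length + 1) 0 := by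
          have hix : ms.length - rs.length + 1 = ms.length - 1 := by omega
          simp [hix, PySem.List.pyGetD, PySem.List.pyGet?_neg_one,
                List.getLast?_eq_getElem?, List.getD]
        rw [e2] at hlast
        have hA : backsubsF (f + 1) rs ms
            = (-1 * PySem.List.pyGetD ms (-1) 0,
               1 + PySem.List.pyGetD ms 0 0 * PySem.List.pyGetD ms 1 0) := by
          simp only [backsubsF]
          rw [if_neg e1, if_pos e2]
        rw [hA, e2]
        simp only [bsRec]
        rw [hlast, PySem.List.pyGetD_ofNat' ms 0, PySem.List.pyGetD_ofNat' ms 1,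
            Prod.mk.injEq]
        exact ⟨by ring, by ring⟩
      · -- rs.length ≥ 3
        have h3' : 3 ≤ rs.length := by omega
        simp only [backsubsF]
        rw [if_neg (by omega), if_neg (by omega)]
        rw [PySem.List.slice_to_neg_ofNat rs 2 (by omega),
            PySem.List.slice_to_neg_ofNat ms 2 (by omega),
            PySem.List.slice_to_neg_one, PySem.List.slice_to_neg_one,
            List.dropLast_eq_take, List.dropLast_eq_take]
        have l2 : (rs.take (rs.length - 2)).length = rs.length - 2 := by
          rw [List.length_take]; omega
        have l1 : (rs.take (rs.length - 1)).length = rs.length - 1 := by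
          rw [List.length_take]; omega
        have m2 : (ms.take (ms.length - 2)).length = ms.length - 2 := by
          rw [List.length_take]; omega
        have m1 : (ms.take (ms.length - 1)).length = ms.length - 1 := by
          rw [List.length_take]; omega
        rw [ih _ _ (by rw [l2]; omega) (by rw [l2, m2]; omega) (by rw [l2]; omega),
            ih _ _ (by rw [l1]; omega) (by rw [l1, m1]; omega) (by rw [l1]; omega)]
        rw [l2, l1, m2, m1]
        set d := ms.length - rs.length with hd
        rw [show ms.length - 2 - (rs.length - 2) = d by omega,
            show ms.length - 1 - (rs.length - 1) = d by omega]
        rw [bsRec_take ms d _ (rs.length - 2) (by omega),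
            bsRec_take ms d _ (rs.length - 1) (by omega)]
        have hneg : PySem.List.pyGetD ms (-1) 0 = ms.getD (rs.length - 3 + 2 + d) 0 := by
          have hne : ms ≠ [] := List.length_pos_iff.mp (by omega)
          rw [show rs.length - 3 + 2 + d = ms.length - 1 by omega]
          simp [PySem.List.pyGetD, PySem.List.pyGet?_neg_one,
                List.getLast?_eq_getElem?, List.getD]
        conv_lhs => rw [hneg]
        rw [show rs.length = (rs.length - 3) + 3 by omega]
        simp only [bsRec]
        rw [show rs.length - 3 + 3 - 2 = rs.length - 3 + 1 by omega,
            show rs.length - 3 + 3 - 1 = rs.length - 3 + 2 by omega,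
            show rs.length - 3 + 3 - 3 = rs.length - 3 by omega]

theorem foldl_bsRec (ms : List Int) (dn : Nat) (n : Nat) :
    ∀ j, 2 ≤ j → j ≤ n →
      (PySem.List.pyRange 3 ((j : Int) + 1) 1).foldl
        (fun (s : Int × Int × Int × Int) k =>
          let c := PySem.List.pyGetD ms (k + (dn : Int) - 1) 0
          (s.2.2.1, s.2.2.2, s.1 - s.2.2.1 * c, s.2.1 - s.2.2.2 * c))
        ((bsRec ms dn 1).1, (bsRec ms dn 1).2, (bsRec ms dn 2).1, (bsRec ms dn 2).2)
      = ((bsRec ms dn (j - 1)).1, (bsRec ms dn (j - 1)).2,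
         (bsRec ms dn j).1, (bsRec ms dn j).2) := by
  intro j
  induction j with
  | zero => omega
  | succ j ih =>
    intro h2 hjn
    by_cases hj : j = 1
    · subst hj
      rw [show ((((1:Nat) + 1 : Nat) : Int) + 1) = (3 : Int) by norm_num,
          show PySem.List.pyRange 3 3 1 = ([] : List Int) from by decide]
      simp
    · have h2j : 2 ≤ j := by omega
      have hstep : PySem.List.pyRange 3 ((j : Int) + 1 + 1) 1
          = PySem.List.pyRange 3 ((j : Int) + 1) 1 ++ [(j : Int) + 1] :=
        PySem.List.pyRange_one_succ_right (by omega)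
      rw [show (((j + 1 : Nat) : Int) + 1) = (j : Int) + 1 + 1 by push_cast; ring, hstep,
          List.foldl_append, ih h2j (by omega)]
      simp only [List.foldl_cons, List.foldl_nil]
      have hget : PySem.List.pyGetD ms ((j : Int) + 1 + (dn : Int) - 1) 0
          = ms.getD (j + dn) 0 := by
        rw [show ((j : Int) + 1 + (dn : Int) - 1) = ((j + dn : Nat) : Int) by push_cast; ring,
            PySem.List.pyGetD_natCast]
      simp only [hget]
      rw [show j + 1 - 1 = j by omega, show j + 1 = (j - 2) + 3 by omega]
      simp only [bsRec]
      rw [show j - 2 + 1 = j - 1 by omega, show j - 2 + 2 = j by omega]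

theorem backsubs_alt_eq_bsRec (rs ms : List Int) (h1 : rs ≠ []) (h2 : rs.length ≤ ms.length) :
    backsubs_alt rs ms = bsRec ms (ms.length - rs.length) rs.length := by
  have hlen : 1 ≤ rs.length := List.length_pos_iff.mpr h1
  by_cases e1 : rs.length = 1
  · simp [backsubs_alt, e1, bsRec, PySem.List.pyGetD_ofNat']
  · have hn2 : 2 ≤ rs.length := by omega
    have hcond : ¬ ((rs.length : Int) = 1) := by omega
    simp only [backsubs_alt, if_neg hcond]
    set dn := ms.length - rs.length with hdn
    have hd : (ms.length : Int) - (rs.length : Int) = (dn : Int) := by omega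
    rw [hd]
    have hinit1 : -PySem.List.pyGetD ms 0 0 = (bsRec ms dn 1).2 := by
      simp [bsRec, PySem.List.pyGetD_ofNat']
    have hinit2a : -PySem.List.pyGetD ms ((dn : Int) + 1) 0 = (bsRec ms dn 2).1 := by
      rw [show ((dn : Int) + 1) = ((dn + 1 : Nat) : Int) by push_cast; ring,
          PySem.List.pyGetD_natCast]
      simp [bsRec]
    have hinit2b : 1 + PySem.List.pyGetD ms 0 0 * PySem.List.pyGetD ms 1 0
        = (bsRec ms dn 2).2 := by
      simp [bsRec, PySem.List.pyGetD_ofNat']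
    rw [hinit1, hinit2a, hinit2b]
    have h1' : ((1 : Int), (bsRec ms dn 1).2, (bsRec ms dn 2).1, (bsRec ms dn 2).2)
        = ((bsRec ms dn 1).1, (bsRec ms dn 1).2, (bsRec ms dn 2).1, (bsRec ms dn 2).2) := by
      simp [bsRec]
    rw [h1', foldl_bsRec ms dn rs.length rs.length hn2 (le_refl _)]

-- ===== VERDICT (by name: the statement is the Claim_ definition above) =====
theorem backsubs_spec : Claim_equal_backsubs := by
  intro rs ms _ hpre
  obtain ⟨h1, h2⟩ := hpre
  unfold Spec_backsubs
  have hlen : 1 ≤ rs.length := List.length_pos_iff.mpr h1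
  rw [backsubs, backsubsF_eq_bsRec rs.length rs ms hlen h2 (le_refl _),
      backsubs_alt_eq_bsRec rs ms h1 h2]
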